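-- pv_equiv track=rewrite | github.com/river-build/river | core/scripts/callstack_parse.py | find_first_core_function
-- ===== SOURCE A (Python) =====
-- from typing import Optional, List
--
-- TRIM_PREFIXES = [
--     'github.com/towns-protocol/towns/',
--     'github.com/ethereum/',
--     'google.golang.org/',
--     'golang.org/',
--     'github.com/jackc/'
-- ]
--
-- def find_first_core_function(lines: List[str]) -> Optional[str]:
--     last_func = None
--     for line in lines:
--         if line.strip().startswith('created by') or line.startswith('\t'):
--             continue
--         # Get raw function name first
--         raw_func = line.strip()
--         if '\t' in raw_func:
--             raw_func = raw_func.split('\t')[0]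
--         last_paren = raw_func.rfind('(')
--         if last_paren >= 0:
--             raw_func = raw_func[:last_paren]
--
--         # Then trim prefixes
--         for prefix in TRIM_PREFIXES:
--             if raw_func.startswith(prefix):
--                 raw_func = raw_func[len(prefix):]
--                 break
--
--         if raw_func.startswith('core/'):
--             return raw_func
--         last_func = raw_func  # Keep track of the last function we've seen
--
--     return last_func  # Return the last function if no core/ function was found
-- ===== SOURCE B (Python) =====
-- from typing import Optional, List
--
-- TRIM_PREFIXES = [
--     'github.com/towns-protocol/towns/',
--     'github.com/ethereum/',
--     'google.golang.org/',
--     'golang.org/',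
--     'github.com/jackc/'
-- ]
--
-- def _clean(line: str) -> str:
--     raw = line.strip()
--     if '\t' in raw:
--         raw = raw.split('\t')[0]
--     last_paren = raw.rfind('(')
--     if last_paren >= 0:
--         raw = raw[:last_paren]
--     prefix = next((p for p in TRIM_PREFIXES if raw.startswith(p)), None)
--     return raw[len(prefix):] if prefix is not None else raw
--
-- def find_first_core_function(lines: List[str]) -> Optional[str]:
--     # Single backward pass: walking from the end, the first candidate seen is the
--     # overall last one (the fallback), and the last 'core/' candidate seen is the
--     # overall first one (overwrite instead of early exit).
--     core = None
--     fallback = None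
--     for line in reversed(lines):
--         if line.strip().startswith('created by') or line.startswith('\t'):
--             continue
--         name = _clean(line)
--         if fallback is None:
--             fallback = name
--         if name.startswith('core/'):
--             core = name
--     return core if core is not None else fallback
-- ===== Notes on version B (the rewrite author's own statement) =====
-- stated objective: alternative
-- what changed: A's forward loop with early return on the first core/ match and a last_func accumulator is replaced by a single backward pass over reversed(lines) with overwrite semantics: the first candidate seen backwards is the fallback, the last core/ candidate seen backwards is the earliest core/ forwards; the prefix for/break loop becomes a next() over TRIM_PREFIXES in a pure _clean helper.
import Mathlib
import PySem

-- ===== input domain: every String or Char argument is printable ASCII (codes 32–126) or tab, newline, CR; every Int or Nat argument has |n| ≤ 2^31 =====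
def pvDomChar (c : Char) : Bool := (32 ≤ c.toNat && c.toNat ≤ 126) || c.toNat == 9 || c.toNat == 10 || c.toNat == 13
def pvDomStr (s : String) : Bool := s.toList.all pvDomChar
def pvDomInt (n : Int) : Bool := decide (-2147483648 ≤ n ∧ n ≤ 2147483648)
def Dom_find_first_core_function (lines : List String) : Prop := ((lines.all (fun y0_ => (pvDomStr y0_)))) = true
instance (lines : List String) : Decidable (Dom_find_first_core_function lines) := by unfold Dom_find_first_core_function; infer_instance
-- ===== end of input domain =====

-- B replaces A's forward early-exit loop by a single backward pass with overwrite
-- semantics (last core seen backwards = first core forwards; first candidate seen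
-- backwards = the fallback). Objective: alternative traversal, same cost.

def TRIM_PREFIXES : List String :=
  ["github.com/towns-protocol/towns/", "github.com/ethereum/", "google.golang.org/",
   "golang.org/", "github.com/jackc/"]

-- ===== PORT A =====
-- A's inner 'for prefix in TRIM_PREFIXES: if startswith: trim; break' loop
def pvTrimA : List String → String → String
  | [], r => r
  | p :: ps, r =>
    if PySem.Str.startswith r p then PySem.Str.slice r (some (PySem.Str.len p)) none
    else pvTrimA ps r

def pvLoopA : List String → Option String → Option String
  | [], last => last
  | line :: rest, last =>
    if PySem.Str.startswith (PySem.Str.strip line) "created by" || PySem.Str.startswith line "\t" then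
      pvLoopA rest last
    else
      let raw0 := PySem.Str.strip line
      -- raw.split('\t')[0]: split? is some for a nonempty separator; [0] is headD (the list is nonempty)
      let raw1 := if PySem.Str.isIn "\t" raw0 then ((PySem.Str.split? raw0 "\t").getD []).headD raw0 else raw0
      let lp := PySem.Str.rfind raw1 "("
      let raw2 := if 0 ≤ lp then PySem.Str.slice raw1 none (some lp) else raw1
      let raw3 := pvTrimA TRIM_PREFIXES raw2
      if PySem.Str.startswith raw3 "core/" then some raw3 else pvLoopA rest (some raw3)

def find_first_core_function (lines : List String) : Option String := pvLoopA lines none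

-- ===== PORT B =====
def pvClean (line : String) : String :=
  let raw0 := PySem.Str.strip line
  let raw1 := if PySem.Str.isIn "\t" raw0 then ((PySem.Str.split? raw0 "\t").getD []).headD raw0 else raw0
  let lp := PySem.Str.rfind raw1 "("
  let raw2 := if 0 ≤ lp then PySem.Str.slice raw1 none (some lp) else raw1
  match TRIM_PREFIXES.find? (fun p => PySem.Str.startswith raw2 p) with
  | some p => PySem.Str.slice raw2 (some (PySem.Str.len p)) none
  | none => raw2

-- one step of B's backward loop: state = (core, fallback)
def pvStepB (st : Option String × Option String) (line : String) : Option String × Option String :=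
  if PySem.Str.startswith (PySem.Str.strip line) "created by" || PySem.Str.startswith line "\t" then
    st
  else
    let name := pvClean line
    let fb := if st.2 = none then some name else st.2
    let core := if PySem.Str.startswith name "core/" then some name else st.1
    (core, fb)

def find_first_core_function_alt (lines : List String) : Option String :=
  let st := lines.reverse.foldl pvStepB (none, none)
  match st.1 with
  | some c => some c
  | none => st.2

-- ===== PRECONDITION & SPEC =====
def Spec_find_first_core_function (lines : List String) (out : Option String) : Prop := out = find_first_core_function_alt lines
instance (lines : List String) (out : Option String) : Decidable (Spec_find_first_core_function lines out) := by unfold Spec_find_first_core_function; infer_instance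

-- ===== CLAIM (what is proved, stated in full; the proofs are below) =====
def Claim_equal_find_first_core_function : Prop := ∀ (lines : List String), Dom_find_first_core_function lines → Spec_find_first_core_function lines (find_first_core_function lines)

-- ===== LEMMAS AND PROOFS =====

-- proof helpers: the keep predicate and A's inline cleaning, named
def pvKeep (line : String) : Bool :=
  !(PySem.Str.startswith (PySem.Str.strip line) "created by" || PySem.Str.startswith line "\t")

def pvCleanA (line : String) : String :=
  let raw0 := PySem.Str.strip line
  let raw1 := if PySem.Str.isIn "\t" raw0 then ((PySem.Str.split? raw0 "\t").getD []).headD raw0 else raw0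
  let lp := PySem.Str.rfind raw1 "("
  let raw2 := if 0 ≤ lp then PySem.Str.slice raw1 none (some lp) else raw1
  pvTrimA TRIM_PREFIXES raw2

def pvIsCore (f : String) : Bool := PySem.Str.startswith f "core/"

-- B's step on an already-cleaned candidate
def pvStepC (st : Option String × Option String) (name : String) : Option String × Option String :=
  ((if pvIsCore name then some name else st.1), (if st.2 = none then some name else st.2))

-- A's for/break prefix loop equals the find?-then-trim in pvClean
lemma pvTrimA_eq_find? (ps : List String) (r : String) :
    pvTrimA ps r =
      match ps.find? (fun p => PySem.Str.startswith r p) with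
      | some p => PySem.Str.slice r (some (PySem.Str.len p)) none
      | none => r := by
  induction ps with
  | nil => rfl
  | cons p ps ih =>
    cases h : PySem.Chars.startswith r.toList p.toList <;> simp [pvTrimA, h, ih]

lemma pvCleanA_eq (line : String) : pvCleanA line = pvClean line := by
  unfold pvCleanA pvClean
  rw [pvTrimA_eq_find?]

-- B's loop body over raw lines equals the candidate-level step over filtered, cleaned lines
lemma foldB_eq_foldC (l : List String) (st : Option String × Option String) :
    l.foldl pvStepB st = ((l.filter pvKeep).map pvClean).foldl pvStepC st := by
  induction l generalizing st with
  | nil => simp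
  | cons line rest ih =>
    cases hc : (PySem.Str.startswith (PySem.Str.strip line) "created by"
        || PySem.Str.startswith line "\t") with
    | true =>
      have hk : pvKeep line = false := by unfold pvKeep; rw [hc]; rfl
      simp only [List.foldl_cons, List.filter_cons, hk, Bool.false_eq_true, if_false]
      rw [show pvStepB st line = st by unfold pvStepB; rw [hc]; simp]
      exact ih st
    | false =>
      have hk : pvKeep line = true := by unfold pvKeep; rw [hc]; rfl
      simp only [List.foldl_cons, List.filter_cons, hk, if_true, List.map_cons]
      rw [show pvStepB st line = pvStepC st (pvClean line) by
        unfold pvStepB pvStepC pvIsCore; rw [hc]; simp]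
      exact ih _

-- the candidate-level fold, characterized: core = last core in cs (else c0), fallback = f0 else first of cs
lemma foldC_char (cs : List String) (c0 f0 : Option String) :
    cs.foldl pvStepC (c0, f0) =
      ((match cs.reverse.find? pvIsCore with
        | some x => some x
        | none => c0),
       match f0 with
       | some v => some v
       | none => cs.head?) := by
  induction cs generalizing c0 f0 with
  | nil => cases f0 <;> rfl
  | cons c cs ih =>
    simp only [List.foldl_cons, pvStepC, List.reverse_cons, List.head?_cons]
    rw [ih]
    simp only [Prod.mk.injEq]
    constructor
    · rw [List.find?_append]
      cases hf : cs.reverse.find? pvIsCore with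
      | some x => simp
      | none =>
        cases hc : pvIsCore c <;> simp [List.find?, hc]
    · cases f0 <;> simp

-- A's whole loop equals first-core-else-last over the candidate list (prior characterization)
lemma pvLoopA_eq (lines : List String) (last : Option String) :
    pvLoopA lines last =
      match ((lines.filter pvKeep).map pvClean).find? pvIsCore with
      | some f => some f
      | none =>
        match ((lines.filter pvKeep).map pvClean).getLast? with
        | some x => some x
        | none => last := by
  induction lines generalizing last with
  | nil => rfl
  | cons line rest ih =>
    cases hc : (PySem.Str.startswith (PySem.Str.strip line) "created by"
        || PySem.Str.startswith line "\t") with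
    | true =>
      have hk : pvKeep line = false := by unfold pvKeep; rw [hc]; rfl
      rw [pvLoopA, hc]
      simp only [if_true, List.filter_cons, hk, Bool.false_eq_true, if_false]
      exact ih last
    | false =>
      have hk : pvKeep line = true := by unfold pvKeep; rw [hc]; rfl
      rw [pvLoopA, hc]
      simp only [Bool.false_eq_true, if_false, List.filter_cons, hk, if_true, List.map_cons]
      rw [show (let raw0 := PySem.Str.strip line
        let raw1 := if PySem.Str.isIn "\t" raw0 then ((PySem.Str.split? raw0 "\t").getD []).headD raw0 else raw0
        let lp := PySem.Str.rfind raw1 "("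
        let raw2 := if 0 ≤ lp then PySem.Str.slice raw1 none (some lp) else raw1
        let raw3 := pvTrimA TRIM_PREFIXES raw2
        if PySem.Str.startswith raw3 "core/" then some raw3 else pvLoopA rest (some raw3))
        = if pvIsCore (pvCleanA line) then some (pvCleanA line) else pvLoopA rest (some (pvCleanA line)) from rfl]
      rw [pvCleanA_eq]
      cases hcore : pvIsCore (pvClean line) with
      | true =>
        rw [if_pos rfl, List.find?_cons, hcore]
      | false =>
        rw [if_neg Bool.false_ne_true, ih (some (pvClean line)), List.find?_cons, hcore]
        cases hfind : ((rest.filter pvKeep).map pvClean).find? pvIsCore with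
        | some f => simp
        | none =>
          cases hcs : (rest.filter pvKeep).map pvClean with
          | nil => simp
          | cons c cs =>
            cases hg : (c :: cs).getLast? with
            | some x => rw [List.getLast?_cons_cons, hg]
            | none => simp at hg

-- ===== VERDICT (by name: the statement is the Claim_ definition above) =====
theorem find_first_core_function_spec : Claim_equal_find_first_core_function := by
  intro lines _
  unfold Spec_find_first_core_function find_first_core_function find_first_core_function_alt
  rw [foldB_eq_foldC, List.filter_reverse, List.map_reverse, foldC_char,
    List.reverse_reverse, List.head?_reverse, pvLoopA_eq lines none]
  cases hf : ((lines.filter pvKeep).map pvClean).find? pvIsCore with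
  | some f => rfl
  | none =>
    cases hg : ((lines.filter pvKeep).map pvClean).getLast? with
    | some x => rfl
    | none => rfl
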